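-- pv_equiv track=rewrite | github.com/sprintcycle/sprintcycle | sprintcycle/execution/agents/regression_tester.py | _generate_regression_report
-- ===== SOURCE A (Python) =====
-- from typing import Any, Dict, List, Optional
--
-- def _generate_regression_report(diff: List[Dict[str, Any]]) -> str:
--     """生成回归测试报告"""
--     if not diff:
--         return "✅ 回归测试通过：无退化、无变更"
--
--     regressions = [d for d in diff if d["status"] == "REGRESSION"]
--     fixed = [d for d in diff if d["status"] == "FIXED"]
--     removed = [d for d in diff if d["status"] == "REMOVED"]
--     new = [d for d in diff if d["status"] == "NEW"]
--
--     lines = ["# 回归测试报告", ""]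
--
--     if regressions:
--         lines.append(f"## ❌ 回归 ({len(regressions)})")
--         for r in regressions:
--             lines.append(f"- {r['detail']}")
--         lines.append("")
--
--     if fixed:
--         lines.append(f"## ✅ 修复 ({len(fixed)})")
--         for f in fixed:
--             lines.append(f"- {f['detail']}")
--         lines.append("")
--
--     if removed:
--         lines.append(f"## ⚠️ 移除 ({len(removed)})")
--         for r in removed:
--             lines.append(f"- {r['detail']}")
--         lines.append("")
--
--     if new:
--         lines.append(f"## 🆕 新增 ({len(new)})")
--         for n in new:
--             lines.append(f"- {n['detail']}")
--
--     return "\n".join(lines)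
-- ===== SOURCE B (Python) =====
-- def _generate_regression_report(diff):
--     if not diff:
--         return "✅ 回归测试通过：无退化、无变更"
--
--     buckets = {}
--     for d in diff:
--         buckets.setdefault(d["status"], []).append(d)
--
--     lines = ["# 回归测试报告", ""]
--     for status, header, blank in (
--         ("REGRESSION", "## ❌ 回归", True),
--         ("FIXED", "## ✅ 修复", True),
--         ("REMOVED", "## ⚠️ 移除", True),
--         ("NEW", "## 🆕 新增", False),
--     ):
--         entries = buckets.get(status, [])
--         if entries:
--             lines.append(f"{header} ({len(entries)})")
--             lines.extend(f"- {e['detail']}" for e in entries)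
--             if blank:
--                 lines.append("")
--     return "\n".join(lines)
-- ===== Notes on version B (the rewrite author's own statement) =====
-- stated objective: simpler
-- what changed: Replaces four separate filter passes and four copy-pasted if-blocks with one bucketing pass over diff plus a data-driven loop over an ordered section-spec table (header, trailing-blank flag).
import Mathlib
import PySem

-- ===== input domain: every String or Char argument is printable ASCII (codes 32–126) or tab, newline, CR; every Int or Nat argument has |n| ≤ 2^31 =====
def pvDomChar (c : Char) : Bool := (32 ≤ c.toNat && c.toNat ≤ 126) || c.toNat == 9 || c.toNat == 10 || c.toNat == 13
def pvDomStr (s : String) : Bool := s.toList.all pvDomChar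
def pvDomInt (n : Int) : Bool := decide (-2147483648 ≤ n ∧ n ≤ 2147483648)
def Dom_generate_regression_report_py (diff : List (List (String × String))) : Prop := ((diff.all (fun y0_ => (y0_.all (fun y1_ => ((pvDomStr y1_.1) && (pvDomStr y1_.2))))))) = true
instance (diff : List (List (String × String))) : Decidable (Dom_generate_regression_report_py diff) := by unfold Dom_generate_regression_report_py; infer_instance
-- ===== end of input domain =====

-- B replaces A's four filter passes and four copy-pasted if-blocks by one bucketing
-- pass plus a data-driven loop over an ordered section-spec table (objective: simpler).

-- ===== PORT A =====
-- dicts are assoc lists; d[k] is the first match (Pre_ guarantees presence where A reads)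
def generate_regression_report_py (diff : List (List (String × String))) : String :=
  if diff.isEmpty then "✅ 回归测试通过：无退化、无变更" else
  let regressions := diff.filter (fun d => ((d.lookup "status").getD "") == "REGRESSION")
  let fixed := diff.filter (fun d => ((d.lookup "status").getD "") == "FIXED")
  let removed := diff.filter (fun d => ((d.lookup "status").getD "") == "REMOVED")
  let new := diff.filter (fun d => ((d.lookup "status").getD "") == "NEW")
  let lines : List String := ["# 回归测试报告", ""]
  let lines := if regressions.isEmpty then lines else
    lines ++ ["## ❌ 回归 (" ++ PySem.Int.toStr regressions.length ++ ")"]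
          ++ regressions.map (fun r => "- " ++ ((r.lookup "detail").getD "")) ++ [""]
  let lines := if fixed.isEmpty then lines else
    lines ++ ["## ✅ 修复 (" ++ PySem.Int.toStr fixed.length ++ ")"]
          ++ fixed.map (fun f => "- " ++ ((f.lookup "detail").getD "")) ++ [""]
  let lines := if removed.isEmpty then lines else
    lines ++ ["## ⚠️ 移除 (" ++ PySem.Int.toStr removed.length ++ ")"]
          ++ removed.map (fun r => "- " ++ ((r.lookup "detail").getD "")) ++ [""]
  let lines := if new.isEmpty then lines else
    lines ++ ["## 🆕 新增 (" ++ PySem.Int.toStr new.length ++ ")"]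
          ++ new.map (fun n => "- " ++ ((n.lookup "detail").getD ""))
  PySem.Str.join "\n" lines

-- ===== PORT B =====
def grrSection (buckets : PySem.Dict String (List (List (String × String))))
    (lines : List String) (spec : String × String × Bool) : List String :=
  let entries := buckets.getD spec.1 []
  if entries.isEmpty then lines else
    lines ++ [spec.2.1 ++ " (" ++ PySem.Int.toStr entries.length ++ ")"]
          ++ entries.map (fun e => "- " ++ ((e.lookup "detail").getD ""))
          ++ (if spec.2.2 then [""] else [])

def grrSpecs : List (String × String × Bool) :=
  [("REGRESSION", "## ❌ 回归", true), ("FIXED", "## ✅ 修复", true),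
   ("REMOVED", "## ⚠️ 移除", true), ("NEW", "## 🆕 新增", false)]

def generate_regression_report_py_alt (diff : List (List (String × String))) : String :=
  if diff.isEmpty then "✅ 回归测试通过：无退化、无变更" else
  let buckets := diff.foldl
    (fun b d => b.modify ((d.lookup "status").getD "") [] (fun l => l ++ [d]))
    PySem.Dict.empty
  PySem.Str.join "\n" (grrSpecs.foldl (grrSection buckets) ["# 回归测试报告", ""])

-- ===== PRECONDITION & SPEC =====
-- Pre_ excludes exactly the inputs where the Python raises KeyError: an entry without
-- a "status" key, or an entry in one of the four reported categories without "detail".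
def Pre_generate_regression_report_py (diff : List (List (String × String))) : Prop :=
  ∀ d ∈ diff, (d.lookup "status").isSome = true ∧
    ((d.lookup "status").getD "" ∈ ["REGRESSION", "FIXED", "REMOVED", "NEW"] →
      (d.lookup "detail").isSome = true)
instance (diff : List (List (String × String))) : Decidable (Pre_generate_regression_report_py diff) := by unfold Pre_generate_regression_report_py; infer_instance
def pvWitness_generate_regression_report_py : (List (List (String × String))) :=
  [[("status", "NEW"), ("detail", "case t1 added")], [("status", "OTHER")]]

def Spec_generate_regression_report_py (diff : List (List (String × String))) (out : String) : Prop := out = generate_regression_report_py_alt diff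
instance (diff : List (List (String × String))) (out : String) : Decidable (Spec_generate_regression_report_py diff out) := by unfold Spec_generate_regression_report_py; infer_instance

-- ===== CLAIM (what is proved, stated in full; the proofs are below) =====
def Claim_equal_generate_regression_report_py : Prop := ∀ (diff : List (List (String × String))), Dom_generate_regression_report_py diff → Pre_generate_regression_report_py diff → Spec_generate_regression_report_py diff (generate_regression_report_py diff)

-- ===== LEMMAS AND PROOFS =====

-- the bucket built by B's single pass holds exactly A's filter for each status
theorem grr_bucket_eq (diff : List (List (String × String)))
    (b : PySem.Dict String (List (List (String × String)))) (s : String) :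
    (diff.foldl (fun b d => b.modify ((d.lookup "status").getD "") [] (fun l => l ++ [d])) b).getD s []
      = b.getD s [] ++ diff.filter (fun d => ((d.lookup "status").getD "") == s) := by
  induction diff generalizing b with
  | nil => simp
  | cons d rest ih =>
    simp only [List.foldl_cons, ih, PySem.Dict.getD_modify, List.filter_cons]
    by_cases h : ((d.lookup "status").getD "") = s
    · simp [h]
    · simp [h, Ne.symm h]

-- ===== VERDICT (by name: the statement is the Claim_ definition above) =====
theorem generate_regression_report_py_spec : Claim_equal_generate_regression_report_py := by
  intro diff _ _
  unfold Spec_generate_regression_report_py generate_regression_report_py generate_regression_report_py_alt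
  by_cases hd : diff.isEmpty
  · simp [hd]
  · simp only [hd, grrSpecs, List.foldl_cons, List.foldl_nil, grrSection,
      grr_bucket_eq, PySem.Dict.getD_empty, List.nil_append]
    simp [show ("## ❌ 回归" : String) ++ " (" = "## ❌ 回归 (" from rfl,
      show ("## ✅ 修复" : String) ++ " (" = "## ✅ 修复 (" from rfl,
      show ("## ⚠️ 移除" : String) ++ " (" = "## ⚠️ 移除 (" from rfl,
      show ("## 🆕 新增" : String) ++ " (" = "## 🆕 新增 (" from rfl]
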